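-- pv_equiv track=rewrite | github.com/overheersbeest/Advent-of-Code | 2019/Day16.py | getNonZeroMultipliers
-- ===== SOURCE A (Python) =====
-- import math
--
-- def getNonZeroMultipliers(pattern, writeIndex, maxIndex):
--     retVal = set()
--     segmentWidth = writeIndex + 1
--     repeatWidth = len(pattern) * segmentWidth
--     repeats = math.ceil((maxIndex + 1) / repeatWidth)
--     for p in range(len(pattern)):
--         mult = pattern[p]
--         if mult != 0:
--             for r in range(repeats):
--                 for s in range(segmentWidth):
--                     if p == 0 and r == 0 and s == 0:
--                         continue
--                     realIndex = (r * repeatWidth) + (p * segmentWidth) + s - 1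
--                     if realIndex <= maxIndex:
--                         retVal.add(realIndex)
--     return retVal
-- ===== SOURCE B (Python) =====
-- def getNonZeroMultipliers(pattern, writeIndex, maxIndex):
--     retVal = set()
--     segmentWidth = writeIndex + 1
--     for p in range(len(pattern)):
--         if pattern[p] != 0:
--             retVal.update(i for i in range(maxIndex + 1)
--                           if ((i + 1) // segmentWidth) % len(pattern) == p)
--     return retVal
-- ===== Notes on version B (the rewrite author's own statement) =====
-- stated objective: alternative
-- what changed: A reconstructs each index arithmetically with three nested loops (pattern position x repeat block x segment slot), computing realIndex = r*repeatWidth + p*segmentWidth + s - 1 and filtering by maxIndex; B never builds indices from (r,s) at all: for each nonzero pattern position p it scans the output indices 0..maxIndex once and keeps i exactly when the closed-form index-to-position map ((i+1)//segmentWidth) % len(pattern) equals p, so the repeat/segment structure and the ceil-computed repeat count disappear.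
-- intended difference: When len(pattern)*(writeIndex+1) divides maxIndex+1 (writeIndex, maxIndex nonnegative, pattern[0] != 0), A's ceil-computed repeats loop stops one block start short and silently omits the index maxIndex whose multiplier pattern[0] is nonzero, while B includes it; including it is the intended result. — e.g. on getNonZeroMultipliers([1], 0, 2): A returns [0, 1], B returns [0, 1, 2]
-- outside the precondition, e.g. on getNonZeroMultipliers([1], -2, 0): A returns set(), B returns {0}
import Mathlib
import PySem

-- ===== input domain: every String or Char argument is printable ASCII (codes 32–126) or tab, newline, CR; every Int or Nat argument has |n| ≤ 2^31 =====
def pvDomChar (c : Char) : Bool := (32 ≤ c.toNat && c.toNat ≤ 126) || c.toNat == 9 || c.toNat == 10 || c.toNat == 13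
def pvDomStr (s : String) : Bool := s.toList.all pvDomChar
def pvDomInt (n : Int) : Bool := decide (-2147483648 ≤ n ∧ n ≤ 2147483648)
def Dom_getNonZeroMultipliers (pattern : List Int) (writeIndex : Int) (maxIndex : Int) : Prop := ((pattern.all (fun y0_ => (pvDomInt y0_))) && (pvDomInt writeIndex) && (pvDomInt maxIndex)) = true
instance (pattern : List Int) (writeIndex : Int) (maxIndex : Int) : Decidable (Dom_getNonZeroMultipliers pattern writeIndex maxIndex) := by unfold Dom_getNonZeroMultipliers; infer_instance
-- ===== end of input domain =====

-- B drops A's index reconstruction from nested repeat/segment loops and instead, per nonzero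
-- pattern position p, scans the output indices 0..maxIndex once and keeps i exactly when the
-- closed-form index-to-position map ((i+1)//segmentWidth) % len(pattern) equals p (objective:
-- alternative algorithm; not faster).

-- ===== PORT A =====
-- math.ceil((maxIndex+1)/repeatWidth) is ported as exact integer ceiling division -((-(maxIndex+1)) // repeatWidth):
-- exact here because |maxIndex+1| ≤ 2^31+1 < 2^53, so float division rounding cannot cross an integer.
-- pattern[p] with p drawn from range(len(pattern)) is in range, so the total form pyGetD is exact.
def getNonZeroMultipliers (pattern : List Int) (writeIndex : Int) (maxIndex : Int) : List Int :=
  let segmentWidth := writeIndex + 1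
  let repeatWidth := (pattern.length : Int) * segmentWidth
  let repeats := -(PySem.Int.floordiv (-(maxIndex + 1)) repeatWidth)
  (PySem.List.pyRange 0 (pattern.length : Int) 1).foldl (fun retVal p =>
    let mult := PySem.List.pyGetD pattern p 0
    if mult ≠ 0 then
      (PySem.List.pyRange 0 repeats 1).foldl (fun retVal r =>
        (PySem.List.pyRange 0 segmentWidth 1).foldl (fun retVal s =>
          if p = 0 ∧ r = 0 ∧ s = 0 then retVal
          else
            let realIndex := r * repeatWidth + p * segmentWidth + s - 1
            if realIndex ≤ maxIndex then PySem.Set.add retVal realIndex else retVal)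
          retVal)
        retVal
    else retVal) []

-- ===== PORT B =====
-- retVal.update(generator) is PySem.Set.update with the filtered index list.
def getNonZeroMultipliers_alt (pattern : List Int) (writeIndex : Int) (maxIndex : Int) : List Int :=
  let segmentWidth := writeIndex + 1
  (PySem.List.pyRange 0 (pattern.length : Int) 1).foldl (fun retVal p =>
    if PySem.List.pyGetD pattern p 0 ≠ 0 then
      PySem.Set.update retVal
        ((PySem.List.pyRange 0 (maxIndex + 1) 1).filter
          (fun i => PySem.Int.mod (PySem.Int.floordiv (i + 1) segmentWidth) (PySem.List.len pattern) == p))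
    else retVal) []

-- ===== PRECONDITION & SPEC =====
-- Pre_ excludes the inputs on which the Python A raises (ZeroDivisionError from repeatWidth == 0,
-- i.e. empty pattern or writeIndex == -1) and, beyond that, writeIndex < -1 with maxIndex >= 0:
-- there the segment width is negative (outside the function's natural domain, writeIndex being an
-- output index) and A's empty-set return is an accident of its empty inner range that B does not mimic.
def Pre_getNonZeroMultipliers (pattern : List Int) (writeIndex : Int) (maxIndex : Int) : Prop :=
  pattern ≠ [] ∧ (0 ≤ writeIndex ∨ (writeIndex ≤ -2 ∧ maxIndex < 0))
instance (pattern : List Int) (writeIndex : Int) (maxIndex : Int) : Decidable (Pre_getNonZeroMultipliers pattern writeIndex maxIndex) := by unfold Pre_getNonZeroMultipliers; infer_instance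
def pvWitness_getNonZeroMultipliers : List Int × Int × Int := ([0, 1, 0, -1], 0, 7)

-- When len(pattern)*(writeIndex+1) divides maxIndex+1 (with nonnegative writeIndex and maxIndex and
-- pattern[0] ≠ 0), A's ceil-computed repeats loop stops one block start short, so A silently omits
-- the index maxIndex even though its multiplier pattern[0] is nonzero, while B returns it;
-- including maxIndex is the intended result.
def D_getNonZeroMultipliers (pattern : List Int) (writeIndex : Int) (maxIndex : Int) : Prop :=
  pattern ≠ [] ∧ 0 ≤ writeIndex ∧ 0 ≤ maxIndex ∧
    ((pattern.length : Int) * (writeIndex + 1)) ∣ (maxIndex + 1) ∧ pattern.headI ≠ 0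
instance (pattern : List Int) (writeIndex : Int) (maxIndex : Int) : Decidable (D_getNonZeroMultipliers pattern writeIndex maxIndex) := by unfold D_getNonZeroMultipliers; infer_instance

def Spec_getNonZeroMultipliers (pattern : List Int) (writeIndex : Int) (maxIndex : Int) (out : List Int) : Prop := ¬ D_getNonZeroMultipliers pattern writeIndex maxIndex → out = getNonZeroMultipliers_alt pattern writeIndex maxIndex
instance (pattern : List Int) (writeIndex : Int) (maxIndex : Int) (out : List Int) : Decidable (Spec_getNonZeroMultipliers pattern writeIndex maxIndex out) := by unfold Spec_getNonZeroMultipliers; infer_instance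

def pvDiffWitness_getNonZeroMultipliers : List Int × Int × Int := ([1], 0, 2)
def pvDiffWitnessOut_getNonZeroMultipliers : (List Int) × (List Int) := ([0, 1], [0, 1, 2])

-- ===== CLAIM (what is proved, stated in full; the proofs are below) =====
def Claim_unchanged_getNonZeroMultipliers : Prop := ∀ (pattern : List Int) (writeIndex : Int) (maxIndex : Int), Dom_getNonZeroMultipliers pattern writeIndex maxIndex → Pre_getNonZeroMultipliers pattern writeIndex maxIndex → Spec_getNonZeroMultipliers pattern writeIndex maxIndex (getNonZeroMultipliers pattern writeIndex maxIndex)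
def Claim_changed_getNonZeroMultipliers : Prop := Dom_getNonZeroMultipliers (pvDiffWitness_getNonZeroMultipliers.1) (pvDiffWitness_getNonZeroMultipliers.2.1) (pvDiffWitness_getNonZeroMultipliers.2.2) ∧ Pre_getNonZeroMultipliers (pvDiffWitness_getNonZeroMultipliers.1) (pvDiffWitness_getNonZeroMultipliers.2.1) (pvDiffWitness_getNonZeroMultipliers.2.2) ∧ D_getNonZeroMultipliers (pvDiffWitness_getNonZeroMultipliers.1) (pvDiffWitness_getNonZeroMultipliers.2.1) (pvDiffWitness_getNonZeroMultipliers.2.2) ∧ getNonZeroMultipliers (pvDiffWitness_getNonZeroMultipliers.1) (pvDiffWitness_getNonZeroMultipliers.2.1) (pvDiffWitness_getNonZeroMultipliers.2.2) = pvDiffWitnessOut_getNonZeroMultipliers.1 ∧ getNonZeroMultipliers_alt (pvDiffWitness_getNonZeroMultipliers.1) (pvDiffWitness_getNonZeroMultipliers.2.1) (pvDiffWitness_getNonZeroMultipliers.2.2) = pvDiffWitnessOut_getNonZeroMultipliers.2 ∧ pvDiffWitnessOut_getNonZeroMultipliers.1 ≠ pvDiffWitnessOut_getNonZeroMultiplie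rs.2
def Claim_exact_getNonZeroMultipliers : Prop := ∀ (pattern : List Int) (writeIndex : Int) (maxIndex : Int), Dom_getNonZeroMultipliers pattern writeIndex maxIndex → Pre_getNonZeroMultipliers pattern writeIndex maxIndex → D_getNonZeroMultipliers pattern writeIndex maxIndex → getNonZeroMultipliers pattern writeIndex maxIndex ≠ getNonZeroMultipliers_alt pattern writeIndex maxIndex

-- ===== LEMMAS AND PROOFS =====

-- a fold whose body never changes the accumulator is the accumulator
lemma pvFoldlKeep {α β : Type} (l : List α) (acc : β) : l.foldl (fun a _ => a) acc = acc := by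
  induction l generalizing acc with
  | nil => rfl
  | cons x xs ih => simpa using ih acc

-- the conditional-add loop body is a set.update with the kept, mapped elements
lemma pvFoldlIfAdd (l : List Int) (C : Int → Prop) [DecidablePred C] (f : Int → Int)
    (s : PySem.Set Int) :
    l.foldl (fun ret x => if C x then PySem.Set.add ret (f x) else ret) s
      = PySem.Set.update s ((l.filter (fun x => decide (C x))).map f) := by
  induction l generalizing s with
  | nil => simp [PySem.Set.update_nil]
  | cons x xs ih =>
    by_cases hx : C x
    · simp only [List.foldl_cons, List.filter_cons, if_pos hx, decide_eq_true hx, ite_true,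
        List.map_cons, PySem.Set.update_cons]
      exact ih _
    · simp only [List.foldl_cons, List.filter_cons, if_neg hx, decide_eq_false hx]
      simpa using ih s

-- filtered, shifted unit range is a clipped unit range
lemma pvRangeFilterNat (a M : Int) (n : Nat) :
    ((PySem.List.pyRange 0 (n : Int) 1).filter (fun s => decide (0 ≤ a + s ∧ a + s ≤ M))).map (fun s => a + s)
      = PySem.List.pyRange (max a 0) (min (a + n) (M + 1)) 1 := by
  induction n with
  | zero =>
    simp only [Nat.cast_zero]
    rw [PySem.List.pyRange_one_eq_nil (le_refl (0:Int)),
      PySem.List.pyRange_one_eq_nil (by omega : min (a + 0) (M+1) ≤ max a 0)]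
    rfl
  | succ n ih =>
    have hcast : ((n + 1 : Nat) : Int) = (n : Int) + 1 := by push_cast; ring
    rw [hcast, PySem.List.pyRange_one_succ_right (by positivity : (0:Int) ≤ (n:Int))]
    rw [List.filter_append, List.map_append, ih]
    by_cases hc : 0 ≤ a + (n : Int) ∧ a + (n : Int) ≤ M
    · have h1 : min (a + (n:Int)) (M + 1) = a + (n:Int) := by omega
      have h2 : min (a + ((n:Int) + 1)) (M + 1) = a + (n:Int) + 1 := by omega
      have h3 : max a 0 ≤ a + (n:Int) := by omega
      simp only [List.filter_cons, List.filter_nil, decide_eq_true hc, if_true,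
        List.map_cons, List.map_nil]
      rw [h1, h2, ← PySem.List.pyRange_one_succ_right h3]
    · simp only [List.filter_cons, List.filter_nil, decide_eq_false hc]
      rcases (by omega : a + (n:Int) < 0 ∨ M < a + (n:Int)) with h | h
      · rw [PySem.List.pyRange_one_eq_nil (by omega : min (a + (n:Int)) (M+1) ≤ max a 0),
          PySem.List.pyRange_one_eq_nil (by omega : min (a + ((n:Int)+1)) (M+1) ≤ max a 0)]
        simp
      · have h4 : min (a + ((n:Int)+1)) (M + 1) = min (a + (n:Int)) (M + 1) := by omega
        rw [h4]; simp

lemma pvRangeFilter (a M w : Int) :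
    ((PySem.List.pyRange 0 w 1).filter (fun s => decide (0 ≤ a + s ∧ a + s ≤ M))).map (fun s => a + s)
      = PySem.List.pyRange (max a 0) (min (a + w) (M + 1)) 1 := by
  rcases (by omega : w ≤ 0 ∨ 0 < w) with hw | hw
  · rw [PySem.List.pyRange_one_eq_nil hw,
      PySem.List.pyRange_one_eq_nil (by omega : min (a + w) (M+1) ≤ max a 0)]
    rfl
  · have hcast : w = ((w.toNat : Nat) : Int) := by omega
    rw [hcast]; exact pvRangeFilterNat a M w.toNat

-- dropping trailing empty blocks from an update-fold over an index range
lemma pvFoldlUpdateDrop (g : Nat → List Int) (n J : Nat) (hJ : J ≤ n)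
    (h : ∀ k, J ≤ k → k < n → g k = []) (acc : PySem.Set Int) :
    (List.range n).foldl (fun ret k => PySem.Set.update ret (g k)) acc
      = (List.range J).foldl (fun ret k => PySem.Set.update ret (g k)) acc := by
  induction n with
  | zero => have : J = 0 := Nat.le_zero.mp hJ; simp [this]
  | succ n ih =>
    rcases Nat.lt_or_ge J (n+1) with hlt | hge
    · have hJn : J ≤ n := Nat.lt_succ_iff.mp hlt
      rw [List.range_succ, List.foldl_append]
      simp only [List.foldl_cons, List.foldl_nil]
      rw [h n hJn (Nat.lt_succ_self n), PySem.Set.update_nil]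
      exact ih hJn (fun k hk hk' => h k hk (Nat.lt_succ_of_lt hk'))
    · have : J = n + 1 := le_antisymm hJ hge
      simp [this]

-- A's innermost segment loop, as one clipped block update
lemma pvSBlock (L sw M p r : Int) (hL : 1 ≤ L) (hsw : 1 ≤ sw) (hp0 : 0 ≤ p) (hr0 : 0 ≤ r)
    (ret : PySem.Set Int) :
    (PySem.List.pyRange 0 sw 1).foldl (fun retVal s =>
        if p = 0 ∧ r = 0 ∧ s = 0 then retVal
        else if r * (L * sw) + p * sw + s - 1 ≤ M
          then PySem.Set.add retVal (r * (L * sw) + p * sw + s - 1) else retVal) ret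
      = PySem.Set.update ret
          (PySem.List.pyRange (max (r * (L * sw) + p * sw - 1) 0)
            (min (r * (L * sw) + p * sw - 1 + sw) (M + 1)) 1) := by
  have hLsw : 0 < L * sw := by positivity
  have ha : (p = 0 ∧ r = 0 ∧ r * (L * sw) + p * sw - 1 = -1) ∨ 0 ≤ r * (L * sw) + p * sw - 1 := by
    by_cases hp : p = 0
    · by_cases hr : r = 0
      · exact Or.inl ⟨hp, hr, by subst hp; subst hr; ring⟩
      · refine Or.inr ?_
        have hr1 : 1 ≤ r := by omega
        nlinarith
    · refine Or.inr ?_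
      have hp1 : 1 ≤ p := by omega
      nlinarith [mul_nonneg hr0 (le_of_lt hLsw)]
  have hstep : (PySem.List.pyRange 0 sw 1).foldl (fun retVal s =>
        if p = 0 ∧ r = 0 ∧ s = 0 then retVal
        else if r * (L * sw) + p * sw + s - 1 ≤ M
          then PySem.Set.add retVal (r * (L * sw) + p * sw + s - 1) else retVal) ret
      = (PySem.List.pyRange 0 sw 1).foldl (fun retVal s =>
          if 0 ≤ (r * (L * sw) + p * sw - 1) + s ∧ (r * (L * sw) + p * sw - 1) + s ≤ M
          then PySem.Set.add retVal ((r * (L * sw) + p * sw - 1) + s) else retVal) ret := by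
    apply PySem.List.foldl_congr_mem
    intro acc s hs
    rw [PySem.List.mem_pyRange_one] at hs
    by_cases hskip : p = 0 ∧ r = 0 ∧ s = 0
    · obtain ⟨hp, hr, hz⟩ := hskip
      subst hp; subst hr; subst hz
      rw [if_pos ⟨rfl, rfl, rfl⟩, if_neg (by rintro ⟨h1, -⟩; nlinarith)]
    · rw [if_neg hskip]
      have hnn : 0 ≤ (r * (L * sw) + p * sw - 1) + s := by
        rcases ha with ⟨hp, hr, he⟩ | he
        · have : s ≠ 0 := fun h => hskip ⟨hp, hr, h⟩
          omega
        · omega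
      have heq : r * (L * sw) + p * sw + s - 1 = (r * (L * sw) + p * sw - 1) + s := by ring
      rw [heq]
      by_cases hM : (r * (L * sw) + p * sw - 1) + s ≤ M
      · rw [if_pos hM, if_pos ⟨hnn, hM⟩]
      · rw [if_neg hM, if_neg (by tauto)]
  rw [hstep, pvFoldlIfAdd _ (fun s => 0 ≤ (r * (L * sw) + p * sw - 1) + s ∧ (r * (L * sw) + p * sw - 1) + s ≤ M) (fun s => (r * (L * sw) + p * sw - 1) + s),
    pvRangeFilter (r * (L * sw) + p * sw - 1) M sw]

-- the per-pattern-position equality of A's repeats×segment loops and B's block-start loop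
lemma pvPerP (L sw M p : Int) (hL : 1 ≤ L) (hsw : 1 ≤ sw) (hp0 : 0 ≤ p)
    (hnd : p = 0 → 0 ≤ M → ¬ ((L * sw) ∣ (M + 1)))
    (acc : PySem.Set Int) :
    (PySem.List.pyRange 0 (-(PySem.Int.floordiv (-(M + 1)) (L * sw))) 1).foldl (fun retVal r =>
        (PySem.List.pyRange 0 sw 1).foldl (fun retVal s =>
          if p = 0 ∧ r = 0 ∧ s = 0 then retVal
          else if r * (L * sw) + p * sw + s - 1 ≤ M
            then PySem.Set.add retVal (r * (L * sw) + p * sw + s - 1) else retVal) retVal) acc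
      = (PySem.List.pyRange (p * sw - 1) (M + 1) (L * sw)).foldl (fun retVal base =>
          PySem.Set.update retVal
            (PySem.List.pyRange (max base 0) (min (base + sw) (M + 1)) 1)) acc := by
  have hrwpos : 0 < L * sw := by positivity
  have hcge : -1 ≤ p * sw - 1 := by nlinarith
  -- A side: collapse the segment loop into block updates
  have stepA : (PySem.List.pyRange 0 (-(PySem.Int.floordiv (-(M + 1)) (L * sw))) 1).foldl (fun retVal r =>
      (PySem.List.pyRange 0 sw 1).foldl (fun retVal s =>
        if p = 0 ∧ r = 0 ∧ s = 0 then retVal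
        else if r * (L * sw) + p * sw + s - 1 ≤ M
          then PySem.Set.add retVal (r * (L * sw) + p * sw + s - 1) else retVal) retVal) acc
    = (PySem.List.pyRange 0 (-(PySem.Int.floordiv (-(M + 1)) (L * sw))) 1).foldl (fun retVal r =>
        PySem.Set.update retVal
          (PySem.List.pyRange (max (r * (L * sw) + p * sw - 1) 0)
            (min (r * (L * sw) + p * sw - 1 + sw) (M + 1)) 1)) acc := by
    apply PySem.List.foldl_congr_mem
    intro a r hmem
    rw [PySem.List.mem_pyRange_one] at hmem
    exact pvSBlock L sw M p r hL hsw hp0 hmem.1 a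
  rw [stepA]
  rw [PySem.List.pyRange_one 0, PySem.List.pyRange_of_pos (p * sw - 1) (M + 1) hrwpos,
    List.foldl_map, List.foldl_map]
  have harg1 : ∀ k : Nat, (0 + (k : Int)) * (L * sw) + p * sw - 1 = (p * sw - 1) + L * sw * (k : Int) := by
    intro k; ring
  simp only [harg1, sub_zero]
  set q : Int := -(PySem.Int.floordiv (-(M + 1)) (L * sw)) with hqdef
  obtain ⟨hq1, hq2⟩ := (PySem.Int.neg_floordiv_neg_eq_iff_of_pos (a := M + 1)
    (q := q) hrwpos).mp hqdef.symm
  set g : Nat → List Int := fun k =>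
    PySem.List.pyRange (max (p * sw - 1 + L * sw * (k : Int)) 0)
      (min (p * sw - 1 + L * sw * (k : Int) + sw) (M + 1)) 1 with hgdef
  set K : Nat := if p * sw - 1 < M + 1
      then ((M + 1 - (p * sw - 1) + L * sw - 1) / (L * sw)).toNat else 0 with hKdef
  have hpsw0 : 0 ≤ p * sw := mul_nonneg hp0 (by omega)
  have hEmpty : ∀ k : Nat, K ≤ k → g k = [] := by
    intro k hk
    by_cases hc : p * sw - 1 < M + 1
    · set N : Int := M + 1 - (p * sw - 1) + L * sw - 1 with hNdef
      have hN0 : 0 ≤ N := by omega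
      have hdm := Int.mul_ediv_add_emod N (L * sw)
      have hm1 : 0 ≤ N % (L * sw) := Int.emod_nonneg N (by omega)
      have hm2 : N % (L * sw) < L * sw := Int.emod_lt_of_pos N hrwpos
      have hq2nn : 0 ≤ N / (L * sw) := Int.ediv_nonneg hN0 (le_of_lt hrwpos)
      have hKk : (N / (L * sw)) ≤ (k : Int) := by
        rw [hKdef, if_pos hc] at hk; omega
      have hmul : (N / (L * sw)) * (L * sw) ≤ (k : Int) * (L * sw) :=
        mul_le_mul_of_nonneg_right hKk (le_of_lt hrwpos)
      have hbig : M + 1 ≤ p * sw - 1 + L * sw * (k : Int) := by nlinarith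
      exact PySem.List.pyRange_one_eq_nil (by omega)
    · have hge : M + 1 ≤ p * sw - 1 := by omega
      have : (0:Int) ≤ L * sw * (k : Int) :=
        mul_nonneg (le_of_lt hrwpos) (by exact_mod_cast Nat.zero_le k)
      exact PySem.List.pyRange_one_eq_nil (by omega)
  by_cases hKA : K ≤ q.toNat
  · rw [pvFoldlUpdateDrop g q.toNat K hKA (fun k hk _ => hEmpty k hk)]
  · rw [not_le] at hKA
    have hM1 : M = -1 := by
      rcases (by omega : 0 ≤ M ∨ M = -1 ∨ M ≤ -2) with hM | hM | hM
      · exfalso; apply hKA.not_ge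
        have hreps1 : 1 ≤ q := by nlinarith
        by_cases hc : p * sw - 1 < M + 1
        · rw [hKdef]; rw [if_pos hc]
          set N : Int := M + 1 - (p * sw - 1) + L * sw - 1 with hNdef
          have hdm := Int.mul_ediv_add_emod N (L * sw)
          have hm1 : 0 ≤ N % (L * sw) := Int.emod_nonneg N (by omega)
          have hm2 : N % (L * sw) < L * sw := Int.emod_lt_of_pos N hrwpos
          have hqle : N / (L * sw) ≤ q := by
            by_contra hgt; rw [not_le] at hgt
            have h1 : (q + 1) * (L * sw) ≤ (N / (L * sw)) * (L * sw) :=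
              mul_le_mul_of_nonneg_right (by omega) (le_of_lt hrwpos)
            have he0 : N % (L * sw) = 0 ∧ p * sw = 0 := by constructor <;> nlinarith
            have hdvd : (L * sw) ∣ (M + 1) := by
              have hdN : (L * sw) ∣ N := Int.dvd_of_emod_eq_zero he0.1
              have hN1 : N = L * sw + (M + 1) := by rw [hNdef]; omega
              rw [hN1] at hdN
              exact (dvd_add_right (dvd_refl _)).mp hdN
            exact hnd (by nlinarith [he0.2]) hM hdvd
          exact Int.toNat_le_toNat hqle
        · rw [hKdef]; rw [if_neg hc]; exact Nat.zero_le _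
      · exact hM
      · exfalso; apply hKA.not_ge
        rw [hKdef, if_neg (by omega : ¬ (p * sw - 1 < M + 1))]
        exact Nat.zero_le _
    have hc : p * sw - 1 < M + 1 := by
      by_contra hcn
      rw [hKdef, if_neg hcn] at hKA
      omega
    have hpz : p * sw = 0 := by omega
    have hall : ∀ k : Nat, g k = [] := by
      intro k
      rcases Nat.eq_zero_or_pos k with hk0 | hk1
      · subst hk0
        have hz : L * sw * ((0:Nat) : Int) = 0 := by simp
        exact PySem.List.pyRange_one_eq_nil (by omega)
      · have h1 : L * sw ≤ L * sw * (k : Int) := by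
          nlinarith [show (1:Int) ≤ (k:Int) from by exact_mod_cast hk1]
        exact PySem.List.pyRange_one_eq_nil (by omega)
    rw [pvFoldlUpdateDrop g q.toNat 0 (Nat.zero_le _) (fun k _ _ => hall k),
      pvFoldlUpdateDrop g K 0 (Nat.zero_le _) (fun k _ _ => hall k)]

-- a fold of whole-block updates is one update with the flattened blocks
lemma pvUpdateAppend (s : PySem.Set Int) (l1 l2 : List Int) :
    PySem.Set.update s (l1 ++ l2) = PySem.Set.update (PySem.Set.update s l1) l2 := by
  simp [PySem.Set.update, List.foldl_append]

lemma pvUpdateFoldl (bs : List Int) (g : Int → List Int) (acc : PySem.Set Int) :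
    bs.foldl (fun s b => PySem.Set.update s (g b)) acc
      = PySem.Set.update acc ((bs.map g).flatten) := by
  induction bs generalizing acc with
  | nil => simp [PySem.Set.update_nil]
  | cons b bs ih =>
    simp only [List.foldl_cons, List.map_cons, List.flatten_cons]
    rw [ih, pvUpdateAppend]

-- unit ranges are strictly increasing
lemma pvPairwiseRangeOne (a b : Int) : (PySem.List.pyRange a b 1).Pairwise (· < ·) := by
  rw [PySem.List.pyRange_one]
  exact List.pairwise_map.mpr (List.Pairwise.imp (by intro x y h; omega) List.pairwise_lt_range)

-- membership in the flattened clipped blocks of pattern position p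
lemma pvMemBlocks (L sw M p i : Int) (hL : 1 ≤ L) (hsw : 1 ≤ sw) (hp0 : 0 ≤ p) (hpL : p < L) :
    (i ∈ ((PySem.List.pyRange (p * sw - 1) (M + 1) (L * sw)).map
        (fun base => PySem.List.pyRange (max base 0) (min (base + sw) (M + 1)) 1)).flatten)
      ↔ 0 ≤ i ∧ i < M + 1 ∧ PySem.Int.mod (PySem.Int.floordiv (i + 1) sw) L = p := by
  have hsw0 : (0:Int) < sw := by omega
  have hL0 : (0:Int) < L := by omega
  have hrw : (0:Int) < L * sw := by positivity
  constructor
  · intro hi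
    rw [List.mem_flatten] at hi
    obtain ⟨l, hl, hil⟩ := hi
    rw [List.mem_map] at hl
    obtain ⟨base, hbase, rfl⟩ := hl
    rw [PySem.List.mem_pyRange_iff_of_pos hrw] at hbase
    obtain ⟨hb1, hb2, k, hk⟩ := hbase
    have hk0 : 0 ≤ k := by nlinarith
    rw [PySem.List.mem_pyRange_one] at hil
    have hbaseval : base = p * sw - 1 + L * sw * k := by omega
    have hbs : (p + L * k) * sw = base + 1 := by rw [hbaseval]; ring
    have hbs1 : (p + L * k + 1) * sw = base + 1 + sw := by rw [hbaseval]; ring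
    refine ⟨by omega, by omega, ?_⟩
    have hq : PySem.Int.floordiv (i + 1) sw = p + L * k := by
      rw [PySem.Int.floordiv_eq_iff_of_pos hsw0]
      constructor <;> omega
    rw [hq, PySem.Int.mod_eq_emod_of_pos hL0, Int.add_mul_emod_self_left,
      Int.emod_eq_of_lt hp0 hpL]
  · rintro ⟨h0, hM, hmod⟩
    obtain ⟨hq1, hq2⟩ :=
      (PySem.Int.floordiv_eq_iff_of_pos (q := PySem.Int.floordiv (i + 1) sw) hsw0).mp rfl
    set q := PySem.Int.floordiv (i + 1) sw with hqd
    have hq0 : 0 ≤ q := by nlinarith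
    have hqk := PySem.Int.floordiv_mul_add_mod q L
    rw [hmod] at hqk
    set k := PySem.Int.floordiv q L with hkd
    have hk0 : 0 ≤ k := by nlinarith
    have hbi : p * sw - 1 + L * sw * k ≤ i := by nlinarith
    rw [List.mem_flatten]
    refine ⟨_, List.mem_map.mpr ⟨p * sw - 1 + L * sw * k, ?_, rfl⟩, ?_⟩
    · rw [PySem.List.mem_pyRange_iff_of_pos hrw]
      exact ⟨by nlinarith, by omega, ⟨k, by ring⟩⟩
    · rw [PySem.List.mem_pyRange_one]
      have h1 : i < p * sw - 1 + L * sw * k + sw := by nlinarith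
      omega

-- the flattened clipped blocks of position p ARE the filtered index range
lemma pvBlockFilter (L sw M p : Int) (hL : 1 ≤ L) (hsw : 1 ≤ sw) (hp0 : 0 ≤ p) (hpL : p < L) :
    ((PySem.List.pyRange (p * sw - 1) (M + 1) (L * sw)).map
        (fun base => PySem.List.pyRange (max base 0) (min (base + sw) (M + 1)) 1)).flatten
      = (PySem.List.pyRange 0 (M + 1) 1).filter
          (fun i => PySem.Int.mod (PySem.Int.floordiv (i + 1) sw) L == p) := by
  have hrw : (0:Int) < L * sw := by positivity
  have hpwL : (((PySem.List.pyRange (p * sw - 1) (M + 1) (L * sw)).map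
      (fun base => PySem.List.pyRange (max base 0) (min (base + sw) (M + 1)) 1)).flatten).Pairwise (· < ·) := by
    rw [List.pairwise_flatten]
    constructor
    · intro l hl
      rw [List.mem_map] at hl
      obtain ⟨base, -, rfl⟩ := hl
      exact pvPairwiseRangeOne _ _
    · rw [PySem.List.pyRange_of_pos _ _ hrw, List.map_map, List.pairwise_map]
      refine List.Pairwise.imp ?_ List.pairwise_lt_range
      intro k k' hkk
      simp only [Function.comp]
      intro x hx y hy
      rw [PySem.List.mem_pyRange_one] at hx hy
      have hdk : (k : Int) + 1 ≤ (k' : Int) := by exact_mod_cast hkk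
      have h2 : L * sw * ((k : Int) + 1) ≤ L * sw * (k' : Int) :=
        mul_le_mul_of_nonneg_left hdk (le_of_lt hrw)
      have h3 : sw ≤ L * sw := le_mul_of_one_le_left (by omega) hL
      have hb : p * sw - 1 + L * sw * (k : Int) + sw ≤ p * sw - 1 + L * sw * (k' : Int) := by
        nlinarith
      omega
  have hpwR : ((PySem.List.pyRange 0 (M + 1) 1).filter
      (fun i => PySem.Int.mod (PySem.Int.floordiv (i + 1) sw) L == p)).Pairwise (· < ·) :=
    (pvPairwiseRangeOne 0 (M + 1)).filter _
  refine List.Perm.eq_of_pairwise (fun a b _ _ h1 h2 => by omega) hpwL hpwR ?_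
  refine (List.perm_ext_iff_of_nodup (hpwL.imp (fun h => ne_of_lt h))
    (hpwR.imp (fun h => ne_of_lt h))).mpr ?_
  intro i
  rw [pvMemBlocks L sw M p i hL hsw hp0 hpL, List.mem_filter, PySem.List.mem_pyRange_one,
    beq_iff_eq]
  tauto

-- ===== VERDICT (by name: the statement is the Claim_ definition above) =====
theorem getNonZeroMultipliers_spec : Claim_unchanged_getNonZeroMultipliers := by
  intro pattern writeIndex maxIndex hdom hpre hnd
  obtain ⟨hne, hw⟩ := hpre
  have hL : 1 ≤ (pattern.length : Int) := by
    have := List.length_pos_of_ne_nil hne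
    exact_mod_cast this
  rcases hw with hw0 | ⟨hw2, hm0⟩
  case inr =>
    -- negative segment width and maxIndex < 0: every inner loop of both programs is empty
    have hsnil : PySem.List.pyRange 0 (writeIndex + 1) 1 = [] :=
      PySem.List.pyRange_one_eq_nil (by omega)
    have hinil : PySem.List.pyRange 0 (maxIndex + 1) 1 = [] :=
      PySem.List.pyRange_one_eq_nil (by omega)
    simp only [getNonZeroMultipliers, getNonZeroMultipliers_alt, hsnil, hinil,
      List.foldl_nil, List.filter_nil, PySem.Set.update_nil]
    apply PySem.List.foldl_congr_mem
    intro acc p hp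
    by_cases hm : PySem.List.pyGetD pattern p 0 ≠ 0
    · rw [if_pos hm, if_pos hm]
      exact pvFoldlKeep _ acc
    · rw [if_neg hm, if_neg hm]
  simp only [getNonZeroMultipliers, getNonZeroMultipliers_alt]
  have hlen : PySem.List.len pattern = (pattern.length : Int) := by simp [PySem.List.len]
  simp only [hlen]
  apply PySem.List.foldl_congr_mem
  intro acc p hp
  rw [PySem.List.mem_pyRange_one] at hp
  by_cases hm : PySem.List.pyGetD pattern p 0 ≠ 0
  · rw [if_pos hm, if_pos hm]
    rw [pvPerP (pattern.length : Int) (writeIndex + 1) maxIndex p hL (by omega) hp.1 ?_ acc,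
      pvUpdateFoldl, pvBlockFilter (pattern.length : Int) (writeIndex + 1) maxIndex p hL
        (by omega) hp.1 hp.2]
    intro hp0 hM0 hdvd
    apply hnd
    refine ⟨hne, by omega, hM0, hdvd, ?_⟩
    have hhead : PySem.List.pyGetD pattern 0 0 = pattern.headI := by
      cases pattern with
      | nil => simp at hne
      | cons x xs => simp [PySem.List.pyGetD_of_nonneg _ _ (le_refl 0)]
    rw [hp0, hhead] at hm
    exact hm
  · rw [if_neg hm, if_neg hm]

theorem getNonZeroMultipliers_changed : Claim_changed_getNonZeroMultipliers := by
  unfold Claim_changed_getNonZeroMultipliers; decide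

-- membership in the nested update-folds (for the tightness proof)
lemma pvMemFoldlUpdate (l : List Int) (g : Int → List Int) (s : PySem.Set Int) (y : Int) :
    y ∈ l.foldl (fun ret x => PySem.Set.update ret (g x)) s ↔ y ∈ s ∨ ∃ x ∈ l, y ∈ g x := by
  induction l generalizing s with
  | nil => simp
  | cons x xs ih =>
    simp only [List.foldl_cons, ih, PySem.Set.mem_update, List.mem_cons]
    constructor
    · rintro ((h | h) | ⟨z, hz, hy⟩)
      · exact Or.inl h
      · exact Or.inr ⟨x, Or.inl rfl, h⟩
      · exact Or.inr ⟨z, Or.inr hz, hy⟩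
    · rintro (h | ⟨z, (rfl | hz), hy⟩)
      · exact Or.inl (Or.inl h)
      · exact Or.inl (Or.inr hy)
      · exact Or.inr ⟨z, hz, hy⟩

lemma pvMemFoldlCond (l : List Int) (C : Int → Prop) [DecidablePred C] (h : Int → List Int)
    (g : Int → Int → List Int) (s : PySem.Set Int) (y : Int) :
    y ∈ l.foldl (fun ret p => if C p then
        (h p).foldl (fun ret2 r => PySem.Set.update ret2 (g p r)) ret else ret) s
      ↔ y ∈ s ∨ ∃ p ∈ l, C p ∧ ∃ r ∈ h p, y ∈ g p r := by
  induction l generalizing s with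
  | nil => simp
  | cons x xs ih =>
    by_cases hc : C x
    · simp only [List.foldl_cons, if_pos hc, ih, pvMemFoldlUpdate, List.mem_cons]
      constructor
      · rintro ((h1 | ⟨r, hr, hy⟩) | ⟨p, hp, hcp, hrest⟩)
        · exact Or.inl h1
        · exact Or.inr ⟨x, Or.inl rfl, hc, r, hr, hy⟩
        · exact Or.inr ⟨p, Or.inr hp, hcp, hrest⟩
      · rintro (h1 | ⟨p, (rfl | hp), hcp, hrest⟩)
        · exact Or.inl (Or.inl h1)
        · exact Or.inl (Or.inr hrest)
        · exact Or.inr ⟨p, hp, hcp, hrest⟩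
    · simp only [List.foldl_cons, if_neg hc, ih, List.mem_cons]
      constructor
      · rintro (h1 | ⟨p, hp, hcp, hrest⟩)
        · exact Or.inl h1
        · exact Or.inr ⟨p, Or.inr hp, hcp, hrest⟩
      · rintro (h1 | ⟨p, (rfl | hp), hcp, hrest⟩)
        · exact Or.inl h1
        · exact absurd hcp hc
        · exact Or.inr ⟨p, hp, hcp, hrest⟩

lemma pvMemFoldlIfUpdate (l : List Int) (C : Int → Prop) [DecidablePred C] (g : Int → List Int)
    (s : PySem.Set Int) (y : Int) :
    y ∈ l.foldl (fun ret p => if C p then PySem.Set.update ret (g p) else ret) s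
      ↔ y ∈ s ∨ ∃ p ∈ l, C p ∧ y ∈ g p := by
  induction l generalizing s with
  | nil => simp
  | cons x xs ih =>
    by_cases hc : C x
    · simp only [List.foldl_cons, if_pos hc, ih, PySem.Set.mem_update, List.mem_cons]
      constructor
      · rintro ((h1 | h1) | ⟨p, hp, hcp, hy⟩)
        · exact Or.inl h1
        · exact Or.inr ⟨x, Or.inl rfl, hc, h1⟩
        · exact Or.inr ⟨p, Or.inr hp, hcp, hy⟩
      · rintro (h1 | ⟨p, (rfl | hp), hcp, hy⟩)
        · exact Or.inl (Or.inl h1)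
        · exact Or.inl (Or.inr hy)
        · exact Or.inr ⟨p, hp, hcp, hy⟩
    · simp only [List.foldl_cons, if_neg hc, ih, List.mem_cons]
      constructor
      · rintro (h1 | ⟨p, hp, hcp, hy⟩)
        · exact Or.inl h1
        · exact Or.inr ⟨p, Or.inr hp, hcp, hy⟩
      · rintro (h1 | ⟨p, (rfl | hp), hcp, hy⟩)
        · exact Or.inl h1
        · exact absurd hcp hc
        · exact Or.inr ⟨p, hp, hcp, hy⟩

theorem getNonZeroMultipliers_tight : Claim_exact_getNonZeroMultipliers := by
  intro pattern writeIndex maxIndex hdom hpre hd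
  obtain ⟨hne, hW0, hM0, hdvd, hhead⟩ := hd
  have hL : 1 ≤ (pattern.length : Int) := by
    have := List.length_pos_of_ne_nil hne
    exact_mod_cast this
  have hsw1 : (1:Int) ≤ writeIndex + 1 := by omega
  have hrwpos : (0:Int) < (pattern.length : Int) * (writeIndex + 1) := by positivity
  have hhead' : PySem.List.pyGetD pattern 0 0 ≠ 0 := by
    have : PySem.List.pyGetD pattern 0 0 = pattern.headI := by
      cases pattern with
      | nil => simp at hne
      | cons x xs => simp [PySem.List.pyGetD_of_nonneg _ _ (le_refl 0)]
    rw [this]; exact hhead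
  obtain ⟨hq1, hq2⟩ := (PySem.Int.neg_floordiv_neg_eq_iff_of_pos (a := maxIndex + 1)
    (q := -(PySem.Int.floordiv (-(maxIndex + 1)) ((pattern.length : Int) * (writeIndex + 1))))
    hrwpos).mp rfl
  intro heq
  -- maxIndex is in B's result …
  have hB : maxIndex ∈ getNonZeroMultipliers_alt pattern writeIndex maxIndex := by
    simp only [getNonZeroMultipliers_alt]
    have hlen : PySem.List.len pattern = (pattern.length : Int) := by simp [PySem.List.len]
    simp only [hlen]
    refine (pvMemFoldlIfUpdate _ (fun p => PySem.List.pyGetD pattern p 0 ≠ 0)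
      (fun p => (PySem.List.pyRange 0 (maxIndex + 1) 1).filter
        (fun i => PySem.Int.mod (PySem.Int.floordiv (i + 1) (writeIndex + 1))
          ((pattern.length : Int)) == p)) [] maxIndex).mpr ?_
    refine Or.inr ⟨0, ?_, hhead', ?_⟩
    · rw [PySem.List.mem_pyRange_one]
      exact ⟨le_refl 0, by omega⟩
    · rw [List.mem_filter]
      constructor
      · rw [PySem.List.mem_pyRange_one]; omega
      · obtain ⟨m, hm⟩ := hdvd
        have hq : PySem.Int.floordiv (maxIndex + 1) (writeIndex + 1) = (pattern.length : Int) * m := by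
          rw [PySem.Int.floordiv_eq_iff_of_pos (by omega : (0:Int) < writeIndex + 1)]
          constructor <;> nlinarith
        rw [beq_iff_eq, hq, PySem.Int.mod_eq_zero_iff_dvd]
        exact Dvd.intro m (by ring)
  -- … but not in A's
  have hA : maxIndex ∉ getNonZeroMultipliers pattern writeIndex maxIndex := by
    simp only [getNonZeroMultipliers]
    have hAeq : (PySem.List.pyRange 0 (pattern.length : Int) 1).foldl (fun retVal p =>
        if PySem.List.pyGetD pattern p 0 ≠ 0 then
          (PySem.List.pyRange 0
              (-(PySem.Int.floordiv (-(maxIndex + 1)) ((pattern.length : Int) * (writeIndex + 1)))) 1).foldl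
            (fun retVal r =>
              (PySem.List.pyRange 0 (writeIndex + 1) 1).foldl (fun retVal s =>
                if p = 0 ∧ r = 0 ∧ s = 0 then retVal
                else if r * ((pattern.length : Int) * (writeIndex + 1)) + p * (writeIndex + 1) + s - 1 ≤ maxIndex
                  then PySem.Set.add retVal
                    (r * ((pattern.length : Int) * (writeIndex + 1)) + p * (writeIndex + 1) + s - 1)
                  else retVal) retVal) retVal
        else retVal) []
      = (PySem.List.pyRange 0 (pattern.length : Int) 1).foldl (fun retVal p =>
        if PySem.List.pyGetD pattern p 0 ≠ 0 then
          (PySem.List.pyRange 0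
              (-(PySem.Int.floordiv (-(maxIndex + 1)) ((pattern.length : Int) * (writeIndex + 1)))) 1).foldl
            (fun retVal r => PySem.Set.update retVal
              (PySem.List.pyRange
                (max (r * ((pattern.length : Int) * (writeIndex + 1)) + p * (writeIndex + 1) - 1) 0)
                (min (r * ((pattern.length : Int) * (writeIndex + 1)) + p * (writeIndex + 1) - 1 + (writeIndex + 1))
                  (maxIndex + 1)) 1)) retVal
        else retVal) [] := by
      apply PySem.List.foldl_congr_mem
      intro acc p hp
      rw [PySem.List.mem_pyRange_one] at hp
      by_cases hm : PySem.List.pyGetD pattern p 0 ≠ 0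
      · rw [if_pos hm, if_pos hm]
        apply PySem.List.foldl_congr_mem
        intro acc2 r hr
        rw [PySem.List.mem_pyRange_one] at hr
        exact pvSBlock (pattern.length : Int) (writeIndex + 1) maxIndex p r hL hsw1 hp.1 hr.1 acc2
      · rw [if_neg hm, if_neg hm]
    rw [hAeq]
    intro hmem
    rcases (pvMemFoldlCond _ (fun p => PySem.List.pyGetD pattern p 0 ≠ 0)
        (fun _ => PySem.List.pyRange 0
          (-(PySem.Int.floordiv (-(maxIndex + 1)) ((pattern.length : Int) * (writeIndex + 1)))) 1)
        (fun p r => PySem.List.pyRange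
          (max (r * ((pattern.length : Int) * (writeIndex + 1)) + p * (writeIndex + 1) - 1) 0)
          (min (r * ((pattern.length : Int) * (writeIndex + 1)) + p * (writeIndex + 1) - 1 + (writeIndex + 1))
            (maxIndex + 1)) 1) [] maxIndex).mp hmem with h0 | ⟨p, hp, -, r, hr, hy⟩
    · simp at h0
    · rw [PySem.List.mem_pyRange_one] at hp hr hy
      obtain ⟨m, hm⟩ := hdvd
      have hple : p ≤ (pattern.length : Int) - 1 := by omega
      have hpswle : p * (writeIndex + 1) ≤ ((pattern.length : Int) - 1) * (writeIndex + 1) :=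
        mul_le_mul_of_nonneg_right hple (by omega)
      have hpsw0 : 0 ≤ p * (writeIndex + 1) := mul_nonneg hp.1 (by omega)
      have hub : maxIndex + 1 ≤ r * ((pattern.length : Int) * (writeIndex + 1)) + p * (writeIndex + 1)
          + (writeIndex + 1) - 1 := by omega
      have hlb : r * ((pattern.length : Int) * (writeIndex + 1)) + p * (writeIndex + 1) ≤ maxIndex + 1 := by
        omega
      have hmr : m = r := by
        by_contra hne'
        rcases (by omega : m ≤ r - 1 ∨ r + 1 ≤ m) with hc | hc
        · have := mul_le_mul_of_nonneg_left hc (le_of_lt hrwpos)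
          nlinarith
        · have := mul_le_mul_of_nonneg_left hc (le_of_lt hrwpos)
          nlinarith
      have hrlt : r ≤ -(PySem.Int.floordiv (-(maxIndex + 1)) ((pattern.length : Int) * (writeIndex + 1))) - 1 := by
        omega
      have := mul_le_mul_of_nonneg_right hrlt (le_of_lt hrwpos)
      nlinarith
  exact hA (heq ▸ hB)
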